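-- pv_equiv track=rewrite | github.com/debdattasarkar/DSA | 4. Educative/1. Two Pointers/8. Minimum Number of Moves to Make Palindrome/py_sol.py | min_moves_to_make_palindrome
-- ===== SOURCE A (Python) =====
-- def min_moves_to_make_palindrome(s):
--     # Convert string to list for easier manipulation
--     s = list(s)
--
--     # Counter to keep track of the total number of swaps
--     moves = 0
--
--     # Loop to find a character from the right (s[j]) that
--     # matches with a character from the left (s[i])
--     i, j = 0, len(s) - 1
--     while i < j:
--         k = j
--         while k > i:
--             # If a matching character is found
--             if s[i] == s[k]:
--                 # Move the matching character to the correct position on the right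
--                 for m in range(k, j):
--                     s[m], s[m + 1] = s[m + 1], s[m]  # Swap
--                     # Increment count of swaps
--                     moves += 1
--                 # Move the right pointer inwards
--                 j -= 1
--                 break
--             k -= 1
--         # If no matching character is found, it must be moved to the center of palindrome
--         if k == i:
--             moves += len(s) // 2 - i
--         i += 1
--
--     return moves
-- ===== SOURCE B (Python) =====
-- def min_moves_to_make_palindrome(s):
--     # Pair-removal formulation: instead of simulating every adjacent swap in
--     # place, repeatedly match the first character of the remaining list with
--     # its rightmost occurrence, charge its distance from the right end in one
--     # step, and delete the pair.
--     t = list(s)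
--     n = len(t)
--     moves = 0
--     i = 0
--     while len(t) > 1:
--         c = t[0]
--         k = 0
--         for idx in range(len(t) - 1, 0, -1):
--             if t[idx] == c:
--                 k = idx
--                 break
--         if k == 0:
--             # unmatched character: it must travel to the centre
--             moves += n // 2 - i
--             del t[0]
--         else:
--             moves += len(t) - 1 - k
--             del t[k]
--             del t[0]
--         i += 1
--     return moves
-- ===== Notes on version B (the rewrite author's own statement) =====
-- stated objective: alternative
-- what changed: A simulates the process in place with three nested loops (scan for a match, then shift it to the right end element-by-element with adjacent swaps, counting each swap); B keeps a shrinking list, matches the first element with its rightmost occurrence, charges the whole distance from the right end in one arithmetic step and deletes the pair, so the inner shifting pass disappears.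
import Mathlib
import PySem

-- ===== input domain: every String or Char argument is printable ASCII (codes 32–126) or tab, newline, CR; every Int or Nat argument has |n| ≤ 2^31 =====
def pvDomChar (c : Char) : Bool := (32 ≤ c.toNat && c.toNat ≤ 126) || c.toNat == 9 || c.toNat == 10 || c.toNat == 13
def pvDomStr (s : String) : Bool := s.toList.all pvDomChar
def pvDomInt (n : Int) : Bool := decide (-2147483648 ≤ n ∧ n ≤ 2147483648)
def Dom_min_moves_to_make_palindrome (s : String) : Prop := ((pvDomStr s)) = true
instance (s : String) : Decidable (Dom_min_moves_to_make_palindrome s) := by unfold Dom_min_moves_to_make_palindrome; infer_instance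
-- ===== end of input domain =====

-- B replaces A's in-place adjacent-swap simulation (three nested loops shifting
-- elements one by one) by a shrinking-list pair-removal loop that charges each
-- matched pair its distance from the right end in one step; same return value.

-- ===== PORT A =====
-- inner `for m in range(k, j)` swap loop of A; all indices are in range in A,
-- so `getD`/`set` are exact here
def pvSwapRange (s : List Char) (m j : Nat) (mv : Int) : List Char × Int :=
  if h : m < j then
    pvSwapRange ((s.set m (s.getD (m+1) ' ')).set (m+1) (s.getD m ' ')) (m+1) j (mv + 1)
  else (s, mv)
termination_by j - m
decreasing_by omega

-- inner `while k > i` scan of A; returns the matched k, or i when the scan exhausts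
def pvInner (s : List Char) (i k : Nat) : Nat :=
  if h : i < k then
    if s.getD k ' ' == s.getD i ' ' then k else pvInner s i (k-1)
  else i
termination_by k
decreasing_by omega

-- outer `while i < j` loop of A
def pvOuter (s : List Char) (i j : Nat) (mv : Int) : Int :=
  if h : i < j then
    if pvInner s i j = i then
      pvOuter s (i+1) j (mv + (((s.length / 2 : Nat) : Int) - (i : Int)))
    else
      pvOuter (pvSwapRange s (pvInner s i j) j mv).1 (i+1) (j-1)
        (pvSwapRange s (pvInner s i j) j mv).2
  else mv
termination_by j - i
decreasing_by all_goals omega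

def min_moves_to_make_palindrome (s : String) : Int :=
  pvOuter s.toList 0 (s.toList.length - 1) 0

-- ===== PORT B =====
-- `for idx in range(len(t)-1, 0, -1): if t[idx] == c: k = idx; break`
-- (0 is the not-found sentinel, exactly as in Source B); indices in range, getD exact
def pvRfind (t : List Char) (c : Char) (idx : Nat) : Nat :=
  if _h : 0 < idx then
    if t.getD idx ' ' == c then idx else pvRfind t c (idx - 1)
  else 0
termination_by idx
decreasing_by omega

-- needed by pvLoopB's termination proof
theorem pvRfind_le (t : List Char) (c : Char) (idx : Nat) : pvRfind t c idx ≤ idx := by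
  fun_induction pvRfind t c idx <;> omega

-- `while len(t) > 1` loop of B: delete the matched pair, count its distance at once
def pvLoopB (t : List Char) (n i : Nat) (mv : Int) : Int :=
  if h : 1 < t.length then
    if pvRfind t (t.getD 0 ' ') (t.length - 1) = 0 then
      pvLoopB (t.eraseIdx 0) n (i+1) (mv + (((n / 2 : Nat) : Int) - (i : Int)))
    else
      pvLoopB ((t.eraseIdx (pvRfind t (t.getD 0 ' ') (t.length - 1))).eraseIdx 0) n (i+1)
        (mv + ((t.length - 1 - pvRfind t (t.getD 0 ' ') (t.length - 1) : Nat) : Int))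
  else mv
termination_by t.length
decreasing_by
  · simp only [List.length_eraseIdx]
    split <;> omega
  · have hk := pvRfind_le t (t.getD 0 ' ') (t.length - 1)
    simp only [List.length_eraseIdx]
    split <;> split <;> omega

def min_moves_to_make_palindrome_alt (s : String) : Int :=
  pvLoopB s.toList s.toList.length 0 0

-- ===== PRECONDITION & SPEC =====
def Spec_min_moves_to_make_palindrome (s : String) (out : Int) : Prop := out = min_moves_to_make_palindrome_alt s
instance (s : String) (out : Int) : Decidable (Spec_min_moves_to_make_palindrome s out) := by unfold Spec_min_moves_to_make_palindrome; infer_instance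

-- ===== CLAIM (what is proved, stated in full; the proofs are below) =====
def Claim_equal_min_moves_to_make_palindrome : Prop := ∀ (s : String), Dom_min_moves_to_make_palindrome s → Spec_min_moves_to_make_palindrome s (min_moves_to_make_palindrome s)

-- ===== LEMMAS AND PROOFS =====

-- the current window of A's state: positions i..j of the (mutated) list
def Wdw (s : List Char) (i j : Nat) : List Char := (s.take (j+1)).drop i

theorem Wdw_get (s : List Char) (i j x : Nat) :
    (Wdw s i j)[x]? = if i + x < j + 1 then s[i+x]? else none := by
  simp [Wdw, List.getElem?_drop, List.getElem?_take]

theorem Wdw_len (s : List Char) (i j : Nat) (hj : j < s.length) :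
    (Wdw s i j).length = j + 1 - i := by
  simp [Wdw]; omega

theorem Wdw_getD (s : List Char) (i j x : Nat) (d : Char) (hx : i + x ≤ j)
    (_hj : j < s.length) : (Wdw s i j).getD x d = s.getD (i+x) d := by
  rw [List.getD_eq_getElem?_getD, List.getD_eq_getElem?_getD, Wdw_get,
    if_pos (show i + x < j + 1 by omega)]

theorem swap_len (s : List Char) (m j : Nat) (mv : Int) :
    (pvSwapRange s m j mv).1.length = s.length := by
  fun_induction pvSwapRange s m j mv with
  | case1 s m mv h ih => simpa using ih
  | case2 => simp

theorem swap_snd (s : List Char) (m j : Nat) (mv : Int) (h : m ≤ j) :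
    (pvSwapRange s m j mv).2 = mv + ((j - m : Nat) : Int) := by
  fun_induction pvSwapRange s m j mv with
  | case1 s m mv h' ih =>
    rw [ih (by omega)]
    have he : ((j - (m+1) : Nat) : Int) = ((j - m : Nat) : Int) - 1 := by omega
    rw [he]; ring
  | case2 s m mv h' =>
    have he : j = m := by omega
    simp [he]

theorem swap_get (s : List Char) (m j : Nat) (mv : Int) (hm : m ≤ j)
    (hj : j < s.length) (x : Nat) :
    (pvSwapRange s m j mv).1[x]? =
      if x < m then s[x]? else if x < j then s[x+1]? else if x = j then s[m]? else s[x]? := by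
  fun_induction pvSwapRange s m j mv with
  | case1 s m mv h ih =>
    have hj' : j < s.length := by simpa using hj
    have hlen : m + 1 < s.length := by omega
    rw [ih (by omega) (by simpa using hj')]
    have hget : ∀ y : Nat, ((s.set m (s.getD (m+1) ' ')).set (m+1) (s.getD m ' '))[y]? =
        if y = m then s[m+1]? else if y = m+1 then s[m]? else s[y]? := by
      intro y
      rw [List.getElem?_set, List.getElem?_set]
      simp only [List.length_set]
      rcases eq_or_ne y m with rfl | hy1
      · rw [if_neg (by omega), if_pos rfl, if_pos (by omega), if_pos rfl,
          List.getElem?_eq_getElem hlen]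
        exact congrArg some (List.getD_eq_getElem s ' ' hlen)
      · rcases eq_or_ne y (m+1) with rfl | hy2
        · rw [if_pos rfl, if_pos (by omega), if_neg hy1, if_pos rfl,
            List.getElem?_eq_getElem (show m < s.length by omega)]
          exact congrArg some (List.getD_eq_getElem s ' ' (by omega))
        · rw [if_neg (by omega), if_neg (by omega), if_neg hy1, if_neg hy2]
    rw [hget, hget, hget]
    split_ifs <;> first | rfl | omega | (congr 1 <;> try omega)
  | case2 s m mv h =>
    have he : m = j := by omega
    subst he
    split_ifs <;> first | rfl | omega | (congr 1 <;> try omega)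

theorem pvInner_ge (s : List Char) (i k : Nat) : i ≤ pvInner s i k := by
  fun_induction pvInner s i k <;> omega

theorem pvInner_le (s : List Char) (i k : Nat) (h : i ≤ k) : pvInner s i k ≤ k := by
  fun_induction pvInner s i k <;> omega

theorem scan (s : List Char) (i j : Nat) (hj : j < s.length) (hij : i ≤ j) :
    ∀ d k, k = i + d → k ≤ j →
      pvRfind (Wdw s i j) ((Wdw s i j).getD 0 ' ') (k - i) = pvInner s i k - i := by
  intro d
  induction d with
  | zero =>
    intro k hk _
    subst hk
    rw [Nat.sub_self, pvRfind, pvInner]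
    simp
  | succ d ih =>
    intro k hk hkj
    subst hk
    have h1 : (Wdw s i j).getD (d+1) ' ' = s.getD (i + (d+1)) ' ' :=
      Wdw_getD s i j (d+1) ' ' (by omega) hj
    have h0 : (Wdw s i j).getD 0 ' ' = s.getD i ' ' := by
      have := Wdw_getD s i j 0 ' ' (by omega) hj
      simpa using this
    rw [show i + (d+1) - i = d + 1 from by omega, pvRfind, pvInner,
      dif_pos (show 0 < d + 1 by omega), dif_pos (show i < i + (d+1) by omega), h1, h0]
    by_cases hm : (s.getD (i + (d+1)) ' ' == s.getD i ' ') = true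
    · rw [if_pos hm, if_pos hm]
      omega
    · rw [if_neg hm, if_neg hm]
      have h3 := ih (i + d) rfl (by omega)
      rw [show i + d - i = d from by omega, h0] at h3
      rw [show i + (d+1) - 1 = i + d from by omega]
      exact h3

theorem win_step (s : List Char) (i j K : Nat) (mv : Int) (hiK : i < K) (hKj : K ≤ j)
    (hj : j < s.length) :
    ((Wdw s i j).eraseIdx (K - i)).eraseIdx 0 = Wdw (pvSwapRange s K j mv).1 (i+1) (j-1) := by
  apply List.ext_getElem?
  intro x
  have hlen' : (pvSwapRange s K j mv).1.length = s.length := swap_len s K j mv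
  rw [List.getElem?_eraseIdx, if_neg (by omega : ¬ x < 0), List.getElem?_eraseIdx,
    Wdw_get, Wdw_get, Wdw_get, swap_get s K j mv hKj hj]
  split_ifs <;> first
    | rfl
    | omega
    | (congr 1 <;> try omega)

theorem main_lemma (n : Nat) : ∀ d (s : List Char) (i j : Nat) (mv : Int), j - i ≤ d →
    j < s.length → s.length = n →
    pvOuter s i j mv = pvLoopB (Wdw s i j) n i mv := by
  intro d
  induction d with
  | zero =>
    intro s i j mv hd hj hn
    have hij : ¬ i < j := by omega
    rw [pvOuter, dif_neg hij, pvLoopB,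
      dif_neg (by rw [Wdw_len s i j hj]; omega : ¬ 1 < (Wdw s i j).length)]
  | succ d ih =>
    intro s i j mv hd hj hn
    by_cases hij : i < j
    · have hlen : (Wdw s i j).length = j + 1 - i := Wdw_len s i j hj
      have hscan : pvRfind (Wdw s i j) ((Wdw s i j).getD 0 ' ') ((Wdw s i j).length - 1)
          = pvInner s i j - i := by
        have h2 := scan s i j hj (le_of_lt hij) (j - i) j (by omega) (le_refl j)
        rw [hlen, show j + 1 - i - 1 = j - i from by omega]
        exact h2
      have hge := pvInner_ge s i j
      have hle := pvInner_le s i j (le_of_lt hij)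
      rw [pvOuter, dif_pos hij, pvLoopB, dif_pos (show 1 < (Wdw s i j).length by omega)]
      by_cases hK : pvInner s i j = i
      · rw [if_pos hK, if_pos (by rw [hscan, hK]; omega)]
        have hwin : (Wdw s i j).eraseIdx 0 = Wdw s (i+1) j := by
          rw [List.eraseIdx_zero, Wdw, Wdw, List.tail_drop]
        rw [hwin, hn]
        exact ih s (i+1) j _ (by omega) hj hn
      · have hiK : i < pvInner s i j := by omega
        rw [if_neg hK, if_neg (by rw [hscan]; omega), hscan]
        have harg : ((Wdw s i j).length - 1 - (pvInner s i j - i) : Nat) =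
            ((j - pvInner s i j : Nat)) := by rw [hlen]; omega
        rw [harg, win_step s i j (pvInner s i j) mv hiK hle hj,
          swap_snd s (pvInner s i j) j mv hle]
        exact ih _ (i+1) (j-1) _ (by omega)
          (by rw [swap_len]; omega) (by rw [swap_len]; exact hn)
    · rw [pvOuter, dif_neg hij, pvLoopB,
        dif_neg (by rw [Wdw_len s i j hj]; omega : ¬ 1 < (Wdw s i j).length)]

-- ===== VERDICT (by name: the statement is the Claim_ definition above) =====
theorem min_moves_to_make_palindrome_spec : Claim_equal_min_moves_to_make_palindrome := by
  unfold Claim_equal_min_moves_to_make_palindrome Spec_min_moves_to_make_palindrome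
  intro s _
  unfold min_moves_to_make_palindrome min_moves_to_make_palindrome_alt
  by_cases hl : s.toList = []
  · rw [hl, pvOuter, pvLoopB]
    simp
  · have hpos : 0 < s.toList.length := List.length_pos_iff.mpr hl
    have hwin : Wdw s.toList 0 (s.toList.length - 1) = s.toList := by
      rw [Wdw, Nat.sub_add_cancel hpos, List.drop_zero, List.take_length]
    rw [main_lemma s.toList.length (s.toList.length) s.toList 0 (s.toList.length - 1) 0
      (by omega) (by omega) rfl, hwin]
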